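-- pv_equiv track=rewrite | github.com/jsfischer343/MathHelperPrograms | MatrixFunctions.py | organizeZeroRowsRecursive
-- ===== SOURCE A (Python) =====
-- def swapRows(M,rowIndex1,rowIndex2):
--     rowLength = len(M[0])
--     temp = [0 for x in range(rowLength)]
--     for i in range(rowLength):
--         temp[i] = M[rowIndex1][i]
--     for i in range(rowLength):
--         M[rowIndex1][i] = M[rowIndex2][i]
--     for i in range(rowLength):
--         M[rowIndex2][i] = temp[i]
--     return M
--
-- def organizeZeroRowsRecursive(M,rowIndex):
--     if(rowIndex==0):
--         return M
--     else:
--         if(isZeroRow(M[rowIndex])):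
--             return organizeZeroRowsRecursive(M,rowIndex-1)
--         else:
--             return organizeZeroRowsRecursive(swapRows(M,rowIndex,rowIndex-1),rowIndex-1)
--
-- def isZeroRow(row):
--     sum = 0
--     for i in range(len(row)):
--         sum += row[i]
--     if(sum==0):
--         return True
--     else:
--         return False
-- ===== SOURCE B (Python) =====
-- def organizeZeroRowsRecursive(M, rowIndex):
--     # Closed-form one-shot: A's cascade of swaps just moves the highest-indexed
--     # non-zero-sum row in positions 1..rowIndex to the top (rotating the prefix).
--     for k in range(rowIndex, 0, -1):
--         if sum(M[k]) != 0:
--             M[0:k + 1] = [M[k]] + M[0:k]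
--             break
--     return M
-- ===== Notes on version B (the rewrite author's own statement) =====
-- stated objective: alternative
-- what changed: Replaces the recursive cascade of element-wise row swaps by a single closed-form step: find the highest index k in 1..rowIndex whose row has non-zero sum and rotate the prefix M[0:k+1] right by one (splice), instead of performing k element-copying swaps.
-- outside the precondition, e.g. on organizeZeroRowsRecursive([[1], [2, 3]], 1): A returns [[2], [1, 3]], B returns [[2, 3], [1]]
import Mathlib
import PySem

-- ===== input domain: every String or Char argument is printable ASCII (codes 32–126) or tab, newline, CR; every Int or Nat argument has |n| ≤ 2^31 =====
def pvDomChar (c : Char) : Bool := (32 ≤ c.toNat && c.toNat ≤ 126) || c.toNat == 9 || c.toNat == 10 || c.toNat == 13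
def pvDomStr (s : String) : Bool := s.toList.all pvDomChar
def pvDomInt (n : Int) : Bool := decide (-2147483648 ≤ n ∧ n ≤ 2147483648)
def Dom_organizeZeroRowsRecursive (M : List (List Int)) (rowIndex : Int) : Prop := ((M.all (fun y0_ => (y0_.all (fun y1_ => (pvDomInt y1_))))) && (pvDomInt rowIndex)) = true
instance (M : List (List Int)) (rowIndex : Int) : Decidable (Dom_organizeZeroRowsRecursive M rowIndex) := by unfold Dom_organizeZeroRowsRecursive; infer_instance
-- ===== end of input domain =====

-- B replaces A's recursive cascade of element-wise row swaps by one closed-form splice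
-- (rotate the prefix at the highest non-zero-sum row); both mutate M in place in Python,
-- and the equivalence proved here is about the returned value.


-- ===== PORT A =====

-- isZeroRow: sum = 0; for i in range(len(row)): sum += row[i]; return sum == 0
def pvIsZeroRowA (row : List Int) : Bool :=
  ((List.range row.length).foldl (fun s i => s + row.getD i 0) 0) == 0

-- one Python cell assignment M[r][i] = v (r, i in range under Pre_)
def pvSetCell (m : List (List Int)) (r i : Nat) (v : Int) : List (List Int) :=
  m.set r ((m.getD r []).set i v)

-- swapRows: temp = row r1 copied element-wise; row r1 := row r2 element-wise; row r2 := temp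
def pvSwapRowsA (M : List (List Int)) (r1 r2 : Int) : List (List Int) :=
  let n := (M.headD []).length
  let temp := (List.range n).foldl (fun t i => t.set i ((M.getD r1.toNat []).getD i 0))
                (List.replicate n 0)
  let M1 := (List.range n).foldl (fun m i => pvSetCell m r1.toNat i ((m.getD r2.toNat []).getD i 0)) M
  (List.range n).foldl (fun m i => pvSetCell m r2.toNat i (temp.getD i 0)) M1

def organizeZeroRowsRecursive (M : List (List Int)) (rowIndex : Int) : List (List Int) :=
  -- Python tests 'rowIndex == 0'; the guard is widened to ≤ 0 only to make the
  -- recursion total (Python diverges on negative rowIndex, which Pre_ excludes).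
  if rowIndex ≤ 0 then M
  else if pvIsZeroRowA (M.getD rowIndex.toNat []) then
    organizeZeroRowsRecursive M (rowIndex - 1)
  else
    organizeZeroRowsRecursive (pvSwapRowsA M rowIndex (rowIndex - 1)) (rowIndex - 1)
termination_by rowIndex.toNat
decreasing_by all_goals omega

-- ===== PORT B =====

-- for k in range(rowIndex, 0, -1): if sum(M[k]) != 0: M[0:k+1] = [M[k]] + M[0:k]; break
def pvGoB (M : List (List Int)) (k : Nat) : List (List Int) :=
  match k with
  | 0 => M
  | k' + 1 =>
    if (M.getD (k' + 1) []).sum ≠ 0 then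
      (M.getD (k' + 1) [] :: M.take (k' + 1)) ++ M.drop (k' + 2)
    else pvGoB M k'

def organizeZeroRowsRecursive_alt (M : List (List Int)) (rowIndex : Int) : List (List Int) :=
  pvGoB M rowIndex.toNat

-- ===== PRECONDITION & SPEC =====
-- Pre_ excludes rowIndex outside [0, len(M)) (there A raises IndexError or recurses without
-- bound) and inputs whose rows 0..rowIndex (the only rows A touches) have unequal lengths,
-- on which A's fixed-width copy of len(M[0]) elements truncates/mixes rows or raises
-- IndexError mid-mutation, while B swaps whole rows.
def Pre_organizeZeroRowsRecursive (M : List (List Int)) (rowIndex : Int) : Prop :=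
  0 ≤ rowIndex ∧ (rowIndex = 0 ∨ rowIndex < (M.length : Int)) ∧
    ∀ i : Nat, i ≤ rowIndex.toNat → (M.getD i []).length = (M.getD 0 []).length
instance (M : List (List Int)) (rowIndex : Int) : Decidable (Pre_organizeZeroRowsRecursive M rowIndex) := by unfold Pre_organizeZeroRowsRecursive; infer_instance

def pvWitness_organizeZeroRowsRecursive : List (List Int) × Int := ([[1, 2], [3, -3]], 1)

def Spec_organizeZeroRowsRecursive (M : List (List Int)) (rowIndex : Int) (out : List (List Int)) : Prop := out = organizeZeroRowsRecursive_alt M rowIndex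
instance (M : List (List Int)) (rowIndex : Int) (out : List (List Int)) : Decidable (Spec_organizeZeroRowsRecursive M rowIndex out) := by unfold Spec_organizeZeroRowsRecursive; infer_instance

-- ===== CLAIM (what is proved, stated in full; the proofs are below) =====
def Claim_equal_organizeZeroRowsRecursive : Prop := ∀ (M : List (List Int)) (rowIndex : Int), Dom_organizeZeroRowsRecursive M rowIndex → Pre_organizeZeroRowsRecursive M rowIndex → Spec_organizeZeroRowsRecursive M rowIndex (organizeZeroRowsRecursive M rowIndex)

-- ===== LEMMAS AND PROOFS =====

lemma pv_map_getD_range (l : List Int) :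
    (List.range l.length).map (fun i => l.getD i 0) = l := by
  apply List.ext_getElem
  · simp
  · intro i h1 h2
    simp [List.getD_eq_getElem?_getD, h2]

lemma pv_foldl_set_range (f : Nat → Int) (n : Nat) (t : List Int) (h : n ≤ t.length) :
    (List.range n).foldl (fun t i => t.set i (f i)) t
      = (List.range n).map f ++ t.drop n := by
  induction n with
  | zero => simp
  | succ n ih =>
    rw [List.range_succ, List.foldl_append, ih (by omega)]
    simp only [List.foldl_cons, List.foldl_nil, List.map_append, List.map_cons, List.map_nil]
    rw [List.set_append]
    simp only [List.length_map, List.length_range]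
    rw [if_neg (by omega), Nat.sub_self, List.drop_eq_getElem_cons (show n < t.length by omega),
      List.set_cons_zero, List.append_assoc, List.singleton_append]

lemma pv_isZeroRowA_eq' (row : List Int) :
    ((List.range row.length).foldl (fun s i => s + row.getD i 0) 0 = row.sum) := by
  rw [← List.foldl_map, pv_map_getD_range, List.sum_eq_foldl]

lemma pv_getD_set_self (M : List (List Int)) (r : Nat) (h : r < M.length) (t : List Int) :
    (M.set r t).getD r [] = t := by
  simp [List.getD_eq_getElem?_getD, h]

lemma pv_getD_set_ne (M : List (List Int)) (r s : Nat) (h : r ≠ s) (t : List Int) :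
    (M.set r t).getD s [] = M.getD s [] := by
  simp [List.getD_eq_getElem?_getD, List.getElem?_set_ne h]

lemma pv_set_self (M : List (List Int)) (r : Nat) (h : r < M.length) :
    M.set r (M.getD r []) = M := by
  rw [List.getD_eq_getElem?_getD, List.getElem?_eq_getElem h]
  simp

lemma pv_foldl_setCell_const (M : List (List Int)) (r1 : Nat) (h1 : r1 < M.length)
    (f : Nat → Int) (n : Nat) :
    (List.range n).foldl (fun m i => pvSetCell m r1 i (f i)) M
      = M.set r1 ((List.range n).foldl (fun t i => t.set i (f i)) (M.getD r1 [])) := by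
  induction n with
  | zero => simp only [List.range_zero, List.foldl_nil]; rw [pv_set_self M r1 h1]
  | succ n ih =>
    rw [List.range_succ, List.foldl_append, List.foldl_append, ih]
    simp only [List.foldl_cons, List.foldl_nil]
    rw [pvSetCell, pv_getD_set_self M r1 h1, List.set_set]

lemma pv_foldl_setCell_other (M : List (List Int)) (r1 r2 : Nat) (hne : r1 ≠ r2)
    (h1 : r1 < M.length) (n : Nat) :
    (List.range n).foldl (fun m i => pvSetCell m r1 i ((m.getD r2 []).getD i 0)) M
      = M.set r1 ((List.range n).foldl (fun t i => t.set i ((M.getD r2 []).getD i 0)) (M.getD r1 [])) := by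
  induction n with
  | zero => simp only [List.range_zero, List.foldl_nil]; rw [pv_set_self M r1 h1]
  | succ n ih =>
    rw [List.range_succ, List.foldl_append, List.foldl_append, ih]
    simp only [List.foldl_cons, List.foldl_nil]
    rw [pvSetCell, pv_getD_set_self M r1 h1, List.set_set, pv_getD_set_ne M r1 r2 hne]

lemma pv_headD_eq_getD (N : List (List Int)) (hne : N ≠ []) :
    N.headD [] = N.getD 0 [] := by
  cases N with
  | nil => exact absurd rfl hne
  | cons a t => simp

lemma pv_swapRowsA_eq (M : List (List Int)) (r1 r2 : Nat) (hne : r1 ≠ r2)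
    (h1 : r1 < M.length) (h2 : r2 < M.length)
    (l1 : (M.getD r1 []).length = (M.headD []).length)
    (l2 : (M.getD r2 []).length = (M.headD []).length) :
    pvSwapRowsA M (r1 : Int) (r2 : Int)
      = (M.set r1 (M.getD r2 [])).set r2 (M.getD r1 []) := by
  unfold pvSwapRowsA
  simp only [Int.toNat_natCast]
  rw [pv_foldl_set_range _ _ _ (by simp), pv_foldl_setCell_other M r1 r2 hne h1,
    pv_foldl_set_range _ _ _ (by omega), pv_foldl_setCell_const _ r2 (by simp [h2]),
    pv_foldl_set_range _ _ _ (by rw [pv_getD_set_ne M r1 r2 hne]; omega),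
    pv_getD_set_ne M r1 r2 hne]
  rw [show List.drop (M.headD []).length (M.getD r1 []) = [] from by
        rw [List.drop_eq_nil_iff]; omega,
    show List.drop (M.headD []).length (M.getD r2 []) = [] from by
        rw [List.drop_eq_nil_iff]; omega]
  rw [List.append_nil, List.append_nil]
  have e2 : List.map (fun i => (M.getD r2 []).getD i 0) (List.range (M.headD []).length)
      = M.getD r2 [] := by rw [← l2, pv_map_getD_range]
  rw [e2]
  -- remaining: the temp row written back equals row r1
  have e1 : List.map (fun i => (M.getD r1 []).getD i 0) (List.range (M.headD []).length)
      = M.getD r1 [] := by rw [← l1, pv_map_getD_range]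
  have etemp : List.map
      (fun i => (List.map (fun i => (M.getD r1 []).getD i 0) (List.range (M.headD []).length)
        ++ List.drop (M.headD []).length (List.replicate (M.headD []).length (0:Int))).getD i 0)
      (List.range (M.headD []).length) = M.getD r1 [] := by
    rw [List.drop_replicate]
    simp only [Nat.sub_self, List.replicate_zero, List.append_nil, e1]
  rw [etemp]

lemma pv_getD_eq (N : List (List Int)) (i : Nat) (h : i < N.length) :
    N.getD i [] = N[i] := by
  rw [List.getD_eq_getElem?_getD, List.getElem?_eq_getElem h]; rfl

lemma pv_rot_swap (j : Nat) : ∀ (N : List (List Int)), j + 1 < N.length →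
    (((N.set (j+1) (N.getD j [])).set j (N.getD (j+1) [])).getD j [] ::
      ((N.set (j+1) (N.getD j [])).set j (N.getD (j+1) [])).take j) ++
      ((N.set (j+1) (N.getD j [])).set j (N.getD (j+1) [])).drop (j+1)
    = (N.getD (j+1) [] :: N.take (j+1)) ++ N.drop (j+2) := by
  induction j with
  | zero =>
    intro N h
    match N, h with
    | x :: y :: r, _ => simp
  | succ j ih =>
    intro N h
    match N, h with
    | x :: N1, h =>
      have h1 : j + 1 < N1.length := by simpa using h
      simp only [List.set_cons_succ, List.getD_cons_succ, List.take_succ_cons,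
        List.drop_succ_cons, List.getD_cons_succ]
      have := ih N1 h1
      simp only [List.cons_append] at this ⊢
      rw [List.cons.injEq] at this
      rw [List.cons.injEq, List.cons.injEq]
      exact ⟨this.1, rfl, this.2⟩

lemma pv_isZeroRowA_eq (row : List Int) : pvIsZeroRowA row = (row.sum == 0) := by
  rw [pvIsZeroRowA, pv_isZeroRowA_eq']

lemma pv_A_bubble (n : Nat) (j : Nat) : ∀ (N : List (List Int)),
    j + 1 < N.length → (∀ i : Nat, i ≤ j + 1 → (N.getD i []).length = n) →
    (N.getD (j+1) []).sum ≠ 0 →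
    organizeZeroRowsRecursive N ((j : Int) + 1)
      = (N.getD (j+1) [] :: N.take (j+1)) ++ N.drop (j+2) := by
  induction j with
  | zero =>
    intro N hlen hrows hnz
    have hne : N ≠ [] := by intro e; rw [e] at hlen; simp at hlen
    have hh := pv_headD_eq_getD N hne
    rw [organizeZeroRowsRecursive, if_neg (by omega)]
    rw [show ((0:Nat) : Int) + 1 = ((0 + 1 : Nat) : Int) by norm_num]
    rw [show (((0 + 1 : Nat) : Int)).toNat = 0 + 1 by omega, pv_isZeroRowA_eq,
      if_neg (by simp only [beq_iff_eq]; exact hnz)]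
    rw [show (((0 + 1 : Nat) : Int)) - 1 = ((0 : Nat) : Int) by norm_num]
    rw [pv_swapRowsA_eq N (0 + 1) 0 (by omega) (by omega) (by omega)
      (by rw [hh]; exact (hrows 1 (by omega)).trans (hrows 0 (by omega)).symm)
      (by rw [hh])]
    rw [organizeZeroRowsRecursive, if_pos (by simp)]
    have hr := pv_rot_swap 0 N hlen
    set N' := (N.set (0 + 1) (N.getD 0 [])).set 0 (N.getD (0 + 1) []) with hN'
    have hlen' : 0 < N'.length := by simp [hN']; omega
    have hid : N'.getD 0 [] :: N'.drop (0 + 1) = N' := by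
      rw [pv_getD_eq N' 0 hlen', ← List.drop_eq_getElem_cons hlen']
      simp
    calc N' = (N'.getD 0 [] :: N'.take 0) ++ N'.drop (0 + 1) := by
              rw [List.take_zero]; simpa using hid.symm
      _ = (N.getD (0+1) [] :: N.take (0+1)) ++ N.drop (0+2) := hr
  | succ j ih =>
    intro N hlen hrows hnz
    have hne : N ≠ [] := by intro e; rw [e] at hlen; simp at hlen
    have hh := pv_headD_eq_getD N hne
    rw [organizeZeroRowsRecursive, if_neg (by omega)]
    rw [show ((j+1:Nat) : Int) + 1 = ((j + 1 + 1 : Nat) : Int) by push_cast; ring]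
    rw [show (((j + 1 + 1 : Nat) : Int)).toNat = j + 1 + 1 by omega, pv_isZeroRowA_eq,
      if_neg (by simp only [beq_iff_eq]; exact hnz)]
    rw [show (((j + 1 + 1 : Nat) : Int)) - 1 = ((j + 1 : Nat) : Int) by push_cast; ring]
    rw [pv_swapRowsA_eq N (j + 1 + 1) (j + 1) (by omega) (by omega) (by omega)
      (by rw [hh]; exact (hrows (j+1+1) (by omega)).trans (hrows 0 (by omega)).symm)
      (by rw [hh]; exact (hrows (j+1) (by omega)).trans (hrows 0 (by omega)).symm)]
    set N' := (N.set (j + 1 + 1) (N.getD (j + 1) [])).set (j + 1) (N.getD (j + 1 + 1) [])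
      with hN'
    have hlenN' : N'.length = N.length := by simp [hN']
    have hrowsN' : ∀ i : Nat, i ≤ j + 1 → (N'.getD i []).length = n := by
      intro i hi
      by_cases hij : i = j + 1
      · subst hij
        rw [hN', pv_getD_set_self _ (j + 1) (by simp; omega)]
        exact hrows (j + 1 + 1) (by omega)
      · rw [hN', pv_getD_set_ne _ (j + 1) i (by omega),
          pv_getD_set_ne _ (j + 1 + 1) i (by omega)]
        exact hrows i (by omega)
    have hgN' : N'.getD (j + 1) [] = N.getD (j + 1 + 1) [] := by
      rw [hN', pv_getD_set_self _ (j + 1) (by simp; omega)]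
    have hstep := ih N' (by omega) hrowsN' (by rw [hgN']; exact hnz)
    rw [show ((j:Nat) : Int) + 1 = ((j + 1 : Nat) : Int) by push_cast; ring] at hstep
    rw [hstep, hgN']
    have hr := pv_rot_swap (j + 1) N hlen
    rw [← hN'] at hr
    rw [hgN'] at hr
    exact hr

lemma pv_main (n : Nat) (k : Nat) : ∀ (N : List (List Int)),
    k < N.length → (∀ i : Nat, i ≤ k → (N.getD i []).length = n) →
    organizeZeroRowsRecursive N (k : Int) = pvGoB N k := by
  induction k with
  | zero =>
    intro N _ _
    rw [organizeZeroRowsRecursive]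
    simp [pvGoB]
  | succ k ih =>
    intro N hlen hrows
    have hc : ((k:Int) + 1) = ((k + 1 : Nat) : Int) := by push_cast; ring
    rw [← hc, organizeZeroRowsRecursive, if_neg (by omega)]
    have ht : ((k:Int) + 1).toNat = k + 1 := by omega
    rw [ht, pv_isZeroRowA_eq]
    by_cases hz : (N.getD (k+1) []).sum = 0
    · rw [if_pos (by simp only [beq_iff_eq]; exact hz)]
      have h1 : ((k:Int) + 1 - 1) = (k : Int) := by ring
      rw [h1, ih N (by omega) (fun i hi => hrows i (by omega)), pvGoB, if_neg (by omega)]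
    · rw [if_neg (by simp only [beq_iff_eq]; exact hz)]
      have h1 : ((k:Int) + 1 - 1) = (k : Int) := by ring
      rw [pvGoB, if_pos hz]
      have := pv_A_bubble n k N hlen hrows hz
      rw [organizeZeroRowsRecursive, if_neg (by omega), ht, pv_isZeroRowA_eq,
        if_neg (by simp only [beq_iff_eq]; exact hz), h1] at this
      rw [h1]
      exact this

-- ===== VERDICT (by name: the statement is the Claim_ definition above) =====
theorem organizeZeroRowsRecursive_spec : Claim_equal_organizeZeroRowsRecursive := by
  intro M r _ hpre
  unfold Spec_organizeZeroRowsRecursive organizeZeroRowsRecursive_alt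
  obtain ⟨h1, h2, hrows⟩ := hpre
  rcases h2 with h0 | h2
  · subst h0
    rw [organizeZeroRowsRecursive]
    simp [pvGoB]
  · have hr : r = ((r.toNat : Nat) : Int) := by omega
    rw [hr]
    exact pv_main (M.getD 0 []).length r.toNat M (by omega) hrows
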